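-- pv_equiv track=rewrite | github.com/ScottWoodward97/IndividualProject | supervised_learn_score_rep.py | convert
-- ===== SOURCE A (Python) =====
-- def convert(hand):
--     """
--     Encodes the hand into a larger, more abstracted one hot representation.
--     Each card in the deck is represented by one of seven states,
--         one for each position in the hand and one for it not being in the hand.
--     Args:
--         hand ([int]): A list of 6 integers representing a hand of Golf.
--     Returns: The hand represented under the larger one hot encoding
--     """
--     state = [-1]*54
--     #Identify the indexes of the cards in the hand
--     for c,i in enumerate(hand):
--         state[i] = c
--     one_hot_state = []
--     for card_pos in state:
--         one_hot_card_pos = [0]*7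
--         one_hot_card_pos[card_pos] = 1
--         one_hot_state += one_hot_card_pos
--     return one_hot_state
-- ===== SOURCE B (Python) =====
-- def convert(hand):
--     """Scatter version: start from 54 'not in hand' one-hot blocks and
--     overwrite the 7-slot block of each card in the hand directly."""
--     one_hot_state = [0, 0, 0, 0, 0, 0, 1] * 54
--     for c, i in enumerate(hand):
--         for j in range(7):
--             one_hot_state[i * 7 + j] = 1 if j == c else 0
--     return one_hot_state
-- ===== Notes on version B (the rewrite author's own statement) =====
-- stated objective: simpler
-- what changed: B drops A's intermediate 54-slot state array and its second full 54-block pass: it starts from 54 copies of the 'not in hand' one-hot block and scatters each of the (at most 7) cards directly into its 7-slot block.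
import Mathlib
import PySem

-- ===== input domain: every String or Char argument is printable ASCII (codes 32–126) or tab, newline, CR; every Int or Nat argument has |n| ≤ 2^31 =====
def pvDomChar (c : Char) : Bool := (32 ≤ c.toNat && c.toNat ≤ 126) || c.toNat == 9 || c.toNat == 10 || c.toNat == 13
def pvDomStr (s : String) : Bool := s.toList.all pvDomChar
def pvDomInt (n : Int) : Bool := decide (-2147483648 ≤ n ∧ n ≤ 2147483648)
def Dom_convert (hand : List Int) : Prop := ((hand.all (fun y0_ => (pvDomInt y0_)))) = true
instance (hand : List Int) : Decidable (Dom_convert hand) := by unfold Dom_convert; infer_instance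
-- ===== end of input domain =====

-- B drops A's intermediate 54-slot state array and its second full 54-block pass,
-- scattering each card's 7-slot one-hot block directly into the output (objective: simpler).

-- ===== PORT A =====
-- state = [-1]*54; for c,i in enumerate(hand): state[i] = c;
-- then for each card_pos in state append [0]*7 with position card_pos set to 1.
def convert (hand : List Int) : List Int :=
  ((PySem.List.enumerate hand 0).foldl
    (fun st ci => PySem.List.pySetD st ci.2 ci.1) (List.replicate 54 (-1 : Int))).foldl
    (fun acc cardPos => acc ++ PySem.List.pySetD (List.replicate 7 (0 : Int)) cardPos 1) []

-- ===== PORT B =====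
-- one_hot_state = [0,0,0,0,0,0,1]*54; for c,i in enumerate(hand):
--   for j in range(7): one_hot_state[i*7+j] = 1 if j == c else 0
def convert_alt (hand : List Int) : List Int :=
  (PySem.List.enumerate hand 0).foldl
    (fun out ci => (PySem.List.pyRange 0 7 1).foldl
      (fun out2 j => PySem.List.pySetD out2 (ci.2 * 7 + j) (if j = ci.1 then 1 else 0)) out)
    (List.replicate 54 ([0, 0, 0, 0, 0, 0, 1] : List Int)).flatten

-- ===== PRECONDITION & SPEC =====
-- Pre_ = exactly where Python A returns: a card value outside the wrap range of the 54-slot state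
-- raises IndexError on state[i], and a hand of more than seven cards always leaves some state entry
-- whose one-hot write raises IndexError; negative card values (Python wraparound) stay INSIDE Pre_
-- and are matched exactly.
def Pre_convert (hand : List Int) : Prop :=
  hand.length ≤ 7 ∧ ∀ x ∈ hand, -54 ≤ x ∧ x < 54
instance (hand : List Int) : Decidable (Pre_convert hand) := by unfold Pre_convert; infer_instance

def pvWitness_convert : List Int := [3, 17, 0, 53, -1, 7]

def Spec_convert (hand : List Int) (out : List Int) : Prop := out = convert_alt hand
instance (hand : List Int) (out : List Int) : Decidable (Spec_convert hand out) := by unfold Spec_convert; infer_instance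

-- ===== CLAIM (what is proved, stated in full; the proofs are below) =====
def Claim_equal_convert : Prop := ∀ (hand : List Int), Dom_convert hand → Pre_convert hand → Spec_convert hand (convert hand)

-- ===== LEMMAS AND PROOFS =====

-- one 7-slot block of A's second loop
def blk (p : Int) : List Int := PySem.List.pySetD (List.replicate 7 (0 : Int)) p 1

-- A's one-hot encoding of a whole state list
def encode (st : List Int) : List Int := (st.map blk).flatten

lemma blk_length (p : Int) : (blk p).length = 7 := by
  simp [blk, PySem.List.length_pySetD]

lemma encode_length (st : List Int) : (encode st).length = st.length * 7 := by
  induction st with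
  | nil => rfl
  | cons x t ih => simp [encode, blk_length] at ih ⊢; omega

-- Python indexing: pySetD with a (possibly negative, in-range) index is List.set at the wrapped index
lemma pySetD_eq_set (xs : List Int) (i : Int) (v : Int) (n : Nat)
    (h1 : -(xs.length : Int) ≤ i) (h2 : i < xs.length)
    (hn : (if 0 ≤ i then i.toNat else xs.length - (-i).toNat) = n) :
    PySem.List.pySetD xs i v = xs.set n v := by
  subst hn
  unfold PySem.List.pySetD PySem.List.pySet? PySem.List.pyIdx?
  by_cases h : 0 ≤ i
  · simp [h, h2]
  · simp [h, h1]

-- writing the 7 slots of block n of a flat list of 7-blocks replaces that block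
lemma set_append_right (l t : List Int) (k : Nat) (v : Int) :
    (l ++ t).set (l.length + k) v = l ++ t.set k v := by
  rw [List.set_append, if_neg (by omega), Nat.add_sub_cancel_left]

lemma set_flatten_blocks : ∀ (B : List (List Int)) (n : Nat) (b0 b1 b2 b3 b4 b5 b6 : Int),
    (∀ l ∈ B, l.length = 7) → n < B.length →
    (((((((B.flatten.set (n*7) b0).set (n*7+1) b1).set (n*7+2) b2).set (n*7+3) b3).set
        (n*7+4) b4).set (n*7+5) b5).set (n*7+6) b6)
      = (B.set n [b0, b1, b2, b3, b4, b5, b6]).flatten := by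
  intro B
  induction B with
  | nil => intro n _ _ _ _ _ _ _ _ h; simp at h
  | cons l B ih =>
    intro n b0 b1 b2 b3 b4 b5 b6 hlen hn
    have hl : l.length = 7 := hlen l (by simp)
    cases n with
    | zero =>
      simp only [List.flatten_cons, Nat.zero_mul, Nat.zero_add, List.set_append, hl]
      norm_num
      rcases l with _|⟨a0,_|⟨a1,_|⟨a2,_|⟨a3,_|⟨a4,_|⟨a5,_|⟨a6,l⟩⟩⟩⟩⟩⟩⟩ <;> simp_all
    | succ m =>
      simp only [List.flatten_cons]
      rw [show (m+1)*7 = l.length + m*7 from by omega]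
      rw [show l.length + m*7 + 1 = l.length + (m*7+1) from by omega,
        show l.length + m*7 + 2 = l.length + (m*7+2) from by omega,
        show l.length + m*7 + 3 = l.length + (m*7+3) from by omega,
        show l.length + m*7 + 4 = l.length + (m*7+4) from by omega,
        show l.length + m*7 + 5 = l.length + (m*7+5) from by omega,
        show l.length + m*7 + 6 = l.length + (m*7+6) from by omega]
      rw [set_append_right, set_append_right,
        set_append_right, set_append_right, set_append_right, set_append_right, set_append_right]
      rw [ih m b0 b1 b2 b3 b4 b5 b6 (fun x hx => hlen x (by simp [hx])) (by simpa using hn)]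
      simp

-- the block B writes for hand position c is exactly A's block for state entry c
lemma blk_of_pos (c : Int) (hc0 : 0 ≤ c) (hc7 : c < 7) :
    blk c = [if (0:Int) = c then 1 else 0, if (1:Int) = c then 1 else 0,
             if (2:Int) = c then 1 else 0, if (3:Int) = c then 1 else 0,
             if (4:Int) = c then 1 else 0, if (5:Int) = c then 1 else 0,
             if (6:Int) = c then 1 else 0] := by
  interval_cases c <;> decide

-- one card's scatter on the encoded output = encoding of one state write
lemma step (st : List Int) (hlen : st.length = 54) (i c : Int)
    (hi1 : -54 ≤ i) (hi2 : i < 54) (hc0 : 0 ≤ c) (hc7 : c < 7) :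
    (PySem.List.pyRange 0 7 1).foldl
      (fun out2 j => PySem.List.pySetD out2 (i * 7 + j) (if j = c then 1 else 0)) (encode st)
    = encode (PySem.List.pySetD st i c) := by
  have hr : PySem.List.pyRange 0 7 1 = [0, 1, 2, 3, 4, 5, 6] := by decide
  obtain ⟨n, hn54, hnif⟩ : ∃ n : Nat, n < 54 ∧ (if 0 ≤ i then i.toNat else 54 - (-i).toNat) = n :=
    ⟨_, by split_ifs <;> omega, rfl⟩
  have hst : PySem.List.pySetD st i c = st.set n c := by
    apply pySetD_eq_set st i c n (by omega) (by omega)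
    rw [hlen]; exact hnif
  have hw : ∀ (out : List Int) (j : Nat) (v : Int), out.length = 378 → j < 7 →
      PySem.List.pySetD out (i * 7 + (j : Int)) v = out.set (n*7 + j) v := by
    intro out j v hout hj
    apply pySetD_eq_set out _ v _ (by omega) (by omega)
    rw [hout]
    by_cases hI : 0 ≤ i
    · rw [if_pos hI] at hnif
      rw [if_pos (by omega)]
      omega
    · rw [if_neg hI] at hnif
      rw [if_neg (by omega)]
      omega
  have hlen378 : (encode st).length = 378 := by rw [encode_length, hlen]
  rw [hr]
  simp only [List.foldl_cons, List.foldl_nil]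
  rw [show (i*7 + 0 : Int) = i*7 + ((0:Nat):Int) by norm_num,
      hw _ 0 _ hlen378 (by omega)]
  rw [show (i*7 + 1 : Int) = i*7 + ((1:Nat):Int) by norm_num,
      hw _ 1 _ (by simp [hlen378]) (by omega)]
  rw [show (i*7 + 2 : Int) = i*7 + ((2:Nat):Int) by norm_num,
      hw _ 2 _ (by simp [hlen378]) (by omega)]
  rw [show (i*7 + 3 : Int) = i*7 + ((3:Nat):Int) by norm_num,
      hw _ 3 _ (by simp [hlen378]) (by omega)]
  rw [show (i*7 + 4 : Int) = i*7 + ((4:Nat):Int) by norm_num,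
      hw _ 4 _ (by simp [hlen378]) (by omega)]
  rw [show (i*7 + 5 : Int) = i*7 + ((5:Nat):Int) by norm_num,
      hw _ 5 _ (by simp [hlen378]) (by omega)]
  rw [show (i*7 + 6 : Int) = i*7 + ((6:Nat):Int) by norm_num,
      hw _ 6 _ (by simp [hlen378]) (by omega)]
  simp only [Nat.add_zero]
  rw [show encode st = (st.map blk).flatten from rfl]
  rw [set_flatten_blocks (st.map blk) n _ _ _ _ _ _ _
        (by intro l hl; obtain ⟨p, _, rfl⟩ := List.mem_map.1 hl; exact blk_length p)
        (by simp [hlen, hn54])]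
  rw [hst, encode, List.map_set, blk_of_pos c hc0 hc7]

-- the whole scatter loop tracks A's state loop, block-encoded
lemma loop (hand : List Int) : ∀ (s : Int) (st : List Int),
    st.length = 54 → 0 ≤ s → s + hand.length ≤ 7 →
    (∀ x ∈ hand, -54 ≤ x ∧ x < 54) →
    (PySem.List.enumerate hand s).foldl
      (fun out ci => (PySem.List.pyRange 0 7 1).foldl
        (fun out2 j => PySem.List.pySetD out2 (ci.2 * 7 + j) (if j = ci.1 then 1 else 0)) out)
      (encode st)
    = encode ((PySem.List.enumerate hand s).foldl
        (fun st2 ci => PySem.List.pySetD st2 ci.2 ci.1) st) := by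
  induction hand with
  | nil => intro s st _ _ _ _; simp [PySem.List.enumerate]
  | cons x t ih =>
    intro s st hlen hs0 hs7 hmem
    have hx := hmem x (by simp)
    have hlt : t.length + 1 = (x :: t).length := by simp
    rw [PySem.List.enumerate_cons, List.foldl_cons, List.foldl_cons]
    rw [step st hlen x s hx.1 hx.2 hs0 (by simp at hs7; omega)]
    exact ih (s+1) (PySem.List.pySetD st x s)
      (by rw [PySem.List.length_pySetD, hlen]) (by omega) (by simp at hs7 ⊢; omega)
      (fun y hy => hmem y (by simp [hy]))

lemma encode_init : encode (List.replicate 54 (-1 : Int))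
    = (List.replicate 54 ([0, 0, 0, 0, 0, 0, 1] : List Int)).flatten := by
  rw [encode, List.map_replicate, show blk (-1) = ([0, 0, 0, 0, 0, 0, 1] : List Int) from by decide]

-- ===== VERDICT (by name: the statement is the Claim_ definition above) =====
theorem convert_spec : Claim_equal_convert := by
  intro hand _ hpre
  obtain ⟨hlen, hmem⟩ := hpre
  unfold Spec_convert convert convert_alt
  rw [PySem.List.foldl_append_eq_flatMap
        (fun cardPos => PySem.List.pySetD (List.replicate 7 (0 : Int)) cardPos 1)]
  rw [List.nil_append, ← encode_init,
      loop hand 0 (List.replicate 54 (-1)) (by simp) le_rfl (by omega) hmem]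
  rw [encode]
  rfl
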